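-- pv_equiv track=rewrite | github.com/VidVercko/testingGitHub | covid19_vid_vercko.py | korakov_do_vseh
-- ===== SOURCE A (Python) =====
-- def okuzeni(skupine1, nosilci):
--     return set().union(*[(a-nosilci) for a in skupine1 if nosilci & a])
--
-- def korakov_do_vseh(skupine1, prvi):
--     st = 0
--     nosilci = {prvi}
--     len_sup = len(set(ime for sk in skupine1 for ime in sk))
--     while len(nosilci) != len_sup:
--         nov_nosilci = nosilci | okuzeni(skupine1,nosilci)
--         st += 1
--         if(len(nov_nosilci)==len(nosilci)):
--             return None
--         nosilci = nov_nosilci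
--     return st
-- ===== SOURCE B (Python) =====
-- def korakov_do_vseh(skupine1, prvi):
--     # Layered BFS: each group is intersection-tested only until it is absorbed,
--     # then dropped from 'remaining'; rounds advance a frontier of newly infected.
--     remaining = [set(g) for g in skupine1 if g]
--     visited = {prvi}
--     frontier = {prvi}
--     dist = 0
--     while frontier:
--         touched = [g for g in remaining if g & frontier]
--         remaining = [g for g in remaining if not (g & frontier)]
--         new = set().union(*touched) - visited
--         if new:
--             dist += 1
--         visited |= new
--         frontier = new
--     return dist if not remaining else None
-- ===== Notes on version B (the rewrite author's own statement) =====
-- stated objective: faster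
-- what changed: Replaces the rescan-all-groups-every-round fixpoint loop with a layered BFS that keeps only not-yet-absorbed groups in a shrinking 'remaining' list, intersects them against the current frontier only, and decides coverage by 'remaining' becoming empty instead of comparing cardinalities against a precomputed universe size.
-- intended difference: When prvi occurs in no group and the groups contain at most one distinct person, A's cardinality comparison misfires: with exactly one distinct person A returns 0 although that person was never infected (B returns None), and with no persons at all A returns None although there is nobody left to infect (B returns 0); B's values are the intended ones. — e.g. on korakov_do_vseh([[1]], 2): A returns some 0, B returns none
import Mathlib
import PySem

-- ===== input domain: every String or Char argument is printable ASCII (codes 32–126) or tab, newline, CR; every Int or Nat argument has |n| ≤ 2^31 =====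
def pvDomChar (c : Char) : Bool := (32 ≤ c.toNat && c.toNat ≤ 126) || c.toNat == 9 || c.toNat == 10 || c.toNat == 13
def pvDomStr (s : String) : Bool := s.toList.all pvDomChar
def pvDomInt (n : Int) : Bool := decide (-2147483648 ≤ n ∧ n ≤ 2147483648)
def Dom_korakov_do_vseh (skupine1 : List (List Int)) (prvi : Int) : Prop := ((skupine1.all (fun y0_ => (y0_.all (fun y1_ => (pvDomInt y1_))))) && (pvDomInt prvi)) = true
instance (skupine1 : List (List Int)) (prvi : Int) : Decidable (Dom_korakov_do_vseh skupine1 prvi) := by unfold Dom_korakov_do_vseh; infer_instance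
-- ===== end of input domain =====

-- B replaces A's rescan-every-group-each-round fixpoint loop by a layered BFS over a shrinking
-- list of not-yet-absorbed groups; equivalence of the RETURN value is proved outside D_ below.

-- ===== PORT A =====
-- okuzeni(skupine1, nosilci) = set().union(*[(a-nosilci) for a in skupine1 if nosilci & a])
def pvOkuzeni (skupine1 : List (PySem.Set Int)) (nosilci : PySem.Set Int) : PySem.Set Int :=
  ((skupine1.filter (fun a => !(PySem.Set.inter nosilci a).isEmpty)).map
      (fun a => PySem.Set.diff a nosilci)).foldl
    (fun acc d => PySem.Set.union acc d) PySem.Set.empty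

-- the while loop of A; fuel is only a totality guard (len_sup + 2 iterations always suffice)
def pvLoopA (skup : List (PySem.Set Int)) (len_sup : Nat) :
    Nat → Int → PySem.Set Int → Option Int
  | 0, _, _ => none
  | fuel + 1, st, nosilci =>
    if nosilci.length = len_sup then some st
    else
      let nov := PySem.Set.union nosilci (pvOkuzeni skup nosilci)
      if nov.length = nosilci.length then none
      else pvLoopA skup len_sup fuel (st + 1) nov

def korakov_do_vseh (skupine1 : List (List Int)) (prvi : Int) : Option Int :=
  let skup := skupine1.map PySem.Set.ofList
  let len_sup := (PySem.Set.ofList (skupine1.flatMap (fun sk => sk))).length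
  pvLoopA skup len_sup (len_sup + 2) 0 (PySem.Set.ofList [prvi])

-- ===== PORT B =====
-- the while loop of B; fuel is only a totality guard (len(remaining) + 2 iterations always suffice)
def pvLoopB : Nat → List (PySem.Set Int) → PySem.Set Int → PySem.Set Int → Int → Option Int
  | 0, _, _, _, _ => none
  | fuel + 1, remaining, visited, frontier, dist =>
    if frontier.isEmpty then
      if remaining.isEmpty then some dist else none
    else
      let touched := remaining.filter (fun g => !(PySem.Set.inter g frontier).isEmpty)
      let remaining' := remaining.filter (fun g => (PySem.Set.inter g frontier).isEmpty)
      let nw := PySem.Set.diff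
        (touched.foldl (fun acc g => PySem.Set.union acc g) PySem.Set.empty) visited
      pvLoopB fuel remaining' (PySem.Set.union visited nw) nw
        (if nw.isEmpty then dist else dist + 1)

def korakov_do_vseh_alt (skupine1 : List (List Int)) (prvi : Int) : Option Int :=
  let remaining := (skupine1.map PySem.Set.ofList).filter (fun g => !g.isEmpty)
  pvLoopB (remaining.length + 2) remaining
    (PySem.Set.ofList [prvi]) (PySem.Set.ofList [prvi]) 0

-- ===== PRECONDITION & SPEC =====
-- When prvi occurs in no group and the groups contain at most one distinct person, A's
-- cardinality comparison misfires: with exactly one distinct person A returns 0 although that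
-- person was never infected (B returns none), and with no persons at all A returns none although
-- there is nobody left to infect (B returns 0); B's values are the intended ones.
def D_korakov_do_vseh (skupine1 : List (List Int)) (prvi : Int) : Prop :=
  (∀ sk ∈ skupine1, prvi ∉ sk) ∧
    ∀ sk ∈ skupine1, ∀ x ∈ sk, ∀ sk' ∈ skupine1, ∀ y ∈ sk', x = y
instance (skupine1 : List (List Int)) (prvi : Int) :
    Decidable (D_korakov_do_vseh skupine1 prvi) := by unfold D_korakov_do_vseh; infer_instance

def Spec_korakov_do_vseh (skupine1 : List (List Int)) (prvi : Int) (out : Option Int) : Prop :=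
  ¬ D_korakov_do_vseh skupine1 prvi → out = korakov_do_vseh_alt skupine1 prvi
instance (skupine1 : List (List Int)) (prvi : Int) (out : Option Int) :
    Decidable (Spec_korakov_do_vseh skupine1 prvi out) := by
  unfold Spec_korakov_do_vseh; infer_instance

def pvDiffWitness_korakov_do_vseh : List (List Int) × Int := ([[1]], 2)
def pvDiffWitnessOut_korakov_do_vseh : (Option Int) × (Option Int) := (some 0, none)

-- ===== CLAIM (what is proved, stated in full; the proofs are below) =====
def Claim_unchanged_korakov_do_vseh : Prop := ∀ (skupine1 : List (List Int)) (prvi : Int), Dom_korakov_do_vseh skupine1 prvi → Spec_korakov_do_vseh skupine1 prvi (korakov_do_vseh skupine1 prvi)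
def Claim_changed_korakov_do_vseh : Prop := Dom_korakov_do_vseh (pvDiffWitness_korakov_do_vseh.1) (pvDiffWitness_korakov_do_vseh.2) ∧ D_korakov_do_vseh (pvDiffWitness_korakov_do_vseh.1) (pvDiffWitness_korakov_do_vseh.2) ∧ korakov_do_vseh (pvDiffWitness_korakov_do_vseh.1) (pvDiffWitness_korakov_do_vseh.2) = pvDiffWitnessOut_korakov_do_vseh.1 ∧ korakov_do_vseh_alt (pvDiffWitness_korakov_do_vseh.1) (pvDiffWitness_korakov_do_vseh.2) = pvDiffWitnessOut_korakov_do_vseh.2 ∧ pvDiffWitnessOut_korakov_do_vseh.1 ≠ pvDiffWitnessOut_korakov_do_vseh.2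
def Claim_exact_korakov_do_vseh : Prop := ∀ (skupine1 : List (List Int)) (prvi : Int), Dom_korakov_do_vseh skupine1 prvi → D_korakov_do_vseh skupine1 prvi → korakov_do_vseh skupine1 prvi ≠ korakov_do_vseh_alt skupine1 prvi


-- ===== LEMMAS AND PROOFS =====

theorem pvIsEmptyFalse (l : List Int) : l.isEmpty = false ↔ ∃ y, y ∈ l := by
  cases l <;> simp

theorem pvBangIsEmpty (l : List Int) : (!l.isEmpty) = true ↔ l ≠ [] := by
  cases l <;> simp

theorem pvMemFoldlUnion (l : List (PySem.Set Int)) (s : PySem.Set Int) (x : Int) :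
    x ∈ l.foldl (fun acc g => PySem.Set.union acc g) s ↔ x ∈ s ∨ ∃ g ∈ l, x ∈ g := by
  induction l generalizing s with
  | nil => simp
  | cons g t ih =>
    simp only [List.foldl_cons, ih, PySem.Set.mem_union, List.mem_cons]
    constructor
    · rintro ((h | h) | ⟨a, ha, hx⟩)
      · exact Or.inl h
      · exact Or.inr ⟨g, Or.inl rfl, h⟩
      · exact Or.inr ⟨a, Or.inr ha, hx⟩
    · rintro (h | ⟨a, rfl | ha, hx⟩)
      · exact Or.inl (Or.inl h)
      · exact Or.inl (Or.inr hx)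
      · exact Or.inr ⟨a, ha, hx⟩

theorem pvMemOkuzeni (G : List (PySem.Set Int)) (N : PySem.Set Int) (x : Int) :
    x ∈ pvOkuzeni G N ↔ ∃ g ∈ G, (∃ y ∈ g, y ∈ N) ∧ x ∈ g ∧ x ∉ N := by
  unfold pvOkuzeni
  rw [pvMemFoldlUnion]
  constructor
  · rintro (h | ⟨d, hd, hxd⟩)
    · exact absurd h (List.not_mem_nil)
    · rw [List.mem_map] at hd
      obtain ⟨a, ha, rfl⟩ := hd
      rw [List.mem_filter] at ha
      obtain ⟨haG, hpred⟩ := ha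
      rw [pvBangIsEmpty, Ne, List.eq_nil_iff_forall_not_mem] at hpred
      push_neg at hpred
      obtain ⟨y, hy⟩ := hpred
      rw [PySem.Set.mem_inter] at hy
      rw [PySem.Set.mem_diff] at hxd
      exact ⟨a, haG, ⟨y, hy.2, hy.1⟩, hxd.1, hxd.2⟩
  · rintro ⟨g, hgG, ⟨y, hyg, hyN⟩, hxg, hxN⟩
    refine Or.inr ⟨PySem.Set.diff g N, ?_, ?_⟩
    · rw [List.mem_map]
      refine ⟨g, ?_, rfl⟩
      rw [List.mem_filter]
      refine ⟨hgG, ?_⟩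
      rw [pvBangIsEmpty]
      exact List.ne_nil_of_mem ((PySem.Set.mem_inter _ _ y).mpr ⟨hyN, hyg⟩)
    · exact (PySem.Set.mem_diff _ _ x).mpr ⟨hxg, hxN⟩

theorem pvSubLen (N U : List Int) (hN : N.Nodup) (hsub : ∀ x ∈ N, x ∈ U) :
    N.length ≤ U.length :=
  (hN.subperm (fun _ ha => hsub _ ha)).length_le

theorem pvMemOfSubLenGe (N U : List Int) (hN : N.Nodup) (hsub : ∀ x ∈ N, x ∈ U)
    (hge : U.length ≤ N.length) : ∀ x ∈ U, x ∈ N := by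
  obtain ⟨l, hperm, hsl⟩ := hN.subperm (fun _ ha => hsub _ ha)
  have h1 : l.length = N.length := hperm.length_eq
  have h2 : l = U := hsl.eq_of_length (by have := hsl.length_le; omega)
  intro x hx
  exact hperm.mem_iff.mp (h2 ▸ hx)

theorem pvFilterLt (p : PySem.Set Int → Bool) (l : List (PySem.Set Int)) (g : PySem.Set Int)
    (hg : g ∈ l) (hpg : p g = false) : (l.filter p).length < l.length := by
  have hle := List.length_filter_le p l
  rcases Nat.lt_or_ge (l.filter p).length l.length with h | h
  · exact h
  · exfalso
    have heq : l.filter p = l := List.filter_sublist.eq_of_length (by omega)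
    have := (List.filter_eq_self.mp heq) g hg
    rw [hpg] at this
    exact Bool.false_ne_true this

theorem pvOfListLenLe (l : List Int) (h : ∀ a ∈ l, ∀ b ∈ l, a = b) :
    (PySem.Set.ofList l).length ≤ 1 := by
  cases l with
  | nil => simp [PySem.Set.ofList_nil]
  | cons x t =>
    rw [PySem.Set.ofList_cons]
    have hnil : PySem.Set.discard (PySem.Set.ofList t) x = [] := by
      rw [List.eq_nil_iff_forall_not_mem]
      intro y hy
      obtain ⟨hyt, hne⟩ := (PySem.Set.mem_discard _ _ _).mp hy
      exact hne (h y (List.mem_cons_of_mem x ((PySem.Set.mem_ofList _ _).mp hyt)) x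
        List.mem_cons_self)
    rw [hnil]
    simp

theorem pvTwoLe (l : List Int) (x y : Int) (hx : x ∈ l) (hy : y ∈ l) (hxy : x ≠ y) :
    2 ≤ l.length := by
  rcases l with _ | ⟨a, _ | ⟨b, t⟩⟩
  · simp at hx
  · simp at hx hy
    exact absurd (hx.trans hy.symm) hxy
  · simp only [List.length_cons]
    omega

theorem pvBisim (G : List (PySem.Set Int)) (U : PySem.Set Int)
    (hUnd : U.Nodup)
    (hGU : ∀ g ∈ G, ∀ x ∈ g, x ∈ U)
    (hUG : ∀ x ∈ U, ∃ g ∈ G, x ∈ g) :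
    ∀ (fuelA fuelB : Nat) (N V F : PySem.Set Int) (R : List (PySem.Set Int)) (st : Int),
      N.Nodup → V.Nodup →
      (∀ x, x ∈ V ↔ x ∈ N) →
      (∀ x ∈ F, x ∈ V) →
      (∀ x ∈ N, x ∈ U) →
      (∀ g, g ∈ R ↔ g ∈ G ∧ g ≠ [] ∧ (∀ x ∈ g, x ∈ V → x ∈ F)) →
      (∀ g ∈ G, (∃ x, x ∈ g ∧ x ∈ V ∧ x ∉ F) → ∀ x ∈ g, x ∈ V) →
      F ≠ [] →
      U.length + 2 ≤ N.length + fuelA →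
      R.length + 2 ≤ fuelB →
      pvLoopA G U.length fuelA st N = pvLoopB fuelB R V F st := by
  intro fuelA
  induction fuelA with
  | zero =>
    intro fuelB N V F R st hNnd _ _ _ hNU _ _ _ hfa _
    exact absurd (pvSubLen N U hNnd hNU) (by omega)
  | succ fa ih =>
    intro fuelB N V F R st hNnd hVnd hVN hFV hNU hR habs hF hfa hfb
    obtain ⟨fb, rfl⟩ : ∃ fb, fuelB = fb + 1 := ⟨fuelB - 1, by omega⟩
    have hFe : F.isEmpty = false := by
      rcases F with _ | ⟨a, t⟩
      · exact absurd rfl hF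
      · rfl
    -- abbreviations
    set K := pvOkuzeni G N with hKdef
    set touched := R.filter (fun g => !(PySem.Set.inter g F).isEmpty) with htdef
    set R' := R.filter (fun g => (PySem.Set.inter g F).isEmpty) with hRdef
    set W := touched.foldl (fun acc g => PySem.Set.union acc g) PySem.Set.empty with hWdef
    set nw := PySem.Set.diff W V with hnwdef
    have htouched : ∀ g, g ∈ touched ↔ g ∈ R ∧ ∃ y, y ∈ g ∧ y ∈ F := by
      intro g
      rw [htdef, List.mem_filter, pvBangIsEmpty, Ne, List.eq_nil_iff_forall_not_mem]
      push_neg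
      simp only [PySem.Set.mem_inter]
    have hnw : ∀ x, x ∈ nw ↔ (∃ g ∈ touched, x ∈ g) ∧ x ∉ V := by
      intro x
      rw [hnwdef, PySem.Set.mem_diff, hWdef, pvMemFoldlUnion]
      simp [PySem.Set.empty]
    have hKnw : ∀ x, x ∈ nw ↔ x ∈ K := by
      intro x
      constructor
      · intro hx
        obtain ⟨⟨g, hgt, hxg⟩, hxV⟩ := (hnw x).mp hx
        obtain ⟨hgR, y, hyg, hyF⟩ := (htouched g).mp hgt
        obtain ⟨hgG, -, -⟩ := (hR g).mp hgR
        exact (pvMemOkuzeni G N x).mpr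
          ⟨g, hgG, ⟨y, hyg, (hVN y).mp (hFV y hyF)⟩, hxg, fun hxN => hxV ((hVN x).mpr hxN)⟩
      · intro hxK
        obtain ⟨g, hgG, ⟨y, hyg, hyN⟩, hxg, hxN⟩ := (pvMemOkuzeni G N x).mp hxK
        by_cases habs' : ∃ z, z ∈ g ∧ z ∈ V ∧ z ∉ F
        · exact absurd ((hVN x).mp (habs g hgG habs' x hxg)) hxN
        · push_neg at habs'
          have hgR : g ∈ R := (hR g).mpr ⟨hgG, List.ne_nil_of_mem hyg, habs'⟩
          have hyF : y ∈ F := habs' y hyg ((hVN y).mpr hyN)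
          have hgt : g ∈ touched := (htouched g).mpr ⟨hgR, y, hyg, hyF⟩
          exact (hnw x).mpr ⟨⟨g, hgt, hxg⟩, fun hxV => hxN ((hVN x).mp hxV)⟩
    by_cases hlen : N.length = U.length
    · -- A returns some st; B absorbs the last groups and then returns some st too
      have hUN : ∀ x ∈ U, x ∈ N := pvMemOfSubLenGe N U hNnd hNU (by omega)
      have hKnil : K = [] := by
        rw [List.eq_nil_iff_forall_not_mem]
        intro x hx
        obtain ⟨g, hgG, -, hxg, hxN⟩ := (pvMemOkuzeni G N x).mp hx
        exact hxN (hUN x (hGU g hgG x hxg))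
      have hnwnil : nw = [] := by
        rw [List.eq_nil_iff_forall_not_mem]
        intro x hx
        exact (List.not_mem_nil) (hKnil ▸ (hKnw x).mp hx)
      have hR'nil : R' = [] := by
        rw [List.eq_nil_iff_forall_not_mem]
        intro g hg
        rw [hRdef, List.mem_filter] at hg
        obtain ⟨hgR, hgE⟩ := hg
        obtain ⟨hgG, hgne, hgVF⟩ := (hR g).mp hgR
        obtain ⟨x, hxg⟩ := List.exists_mem_of_ne_nil g hgne
        have hxF : x ∈ F := hgVF x hxg ((hVN x).mpr (hUN x (hGU g hgG x hxg)))
        have : x ∈ PySem.Set.inter g F := (PySem.Set.mem_inter _ _ x).mpr ⟨hxg, hxF⟩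
        rw [List.isEmpty_iff.mp hgE] at this
        exact (List.not_mem_nil) this
      obtain ⟨fb', rfl⟩ : ∃ fb', fb = fb' + 1 := ⟨fb - 1, by omega⟩
      simp only [pvLoopA, pvLoopB, hFe, if_pos hlen, Bool.false_eq_true, if_false,
        ← htdef, ← hRdef, ← hWdef, ← hnwdef, hnwnil, hR'nil]
      rfl
    · simp only [pvLoopA, if_neg hlen]
      have hNsubnov : ∀ x ∈ N, x ∈ PySem.Set.union N K :=
        fun x hx => (PySem.Set.mem_union _ _ x).mpr (Or.inl hx)
      have hnovnd : (PySem.Set.union N K).Nodup := PySem.Set.nodup_union _ _ hNnd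
      by_cases hstall : (PySem.Set.union N K).length = N.length
      · -- A returns none; B stalls with nw = [] and still sees an uncovered group
        have hnovN : ∀ x ∈ PySem.Set.union N K, x ∈ N :=
          pvMemOfSubLenGe N (PySem.Set.union N K) hNnd hNsubnov (by omega)
        have hKnil : K = [] := by
          rw [List.eq_nil_iff_forall_not_mem]
          intro x hx
          obtain ⟨g, hgG, hmeet, hxg, hxN⟩ := (pvMemOkuzeni G N x).mp hx
          exact hxN (hnovN x ((PySem.Set.mem_union _ _ x).mpr (Or.inr hx)))
        have hnwnil : nw = [] := by
          rw [List.eq_nil_iff_forall_not_mem]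
          intro x hx
          exact (List.not_mem_nil) (hKnil ▸ (hKnw x).mp hx)
        have hlt : N.length < U.length :=
          lt_of_le_of_ne (pvSubLen N U hNnd hNU) hlen
        obtain ⟨u, huU, huN⟩ : ∃ u, u ∈ U ∧ u ∉ N := by
          by_contra h
          push_neg at h
          exact absurd (pvSubLen U N hUnd h) (by omega)
        obtain ⟨g, hgG, hug⟩ := hUG u huU
        have hgV : ∀ z ∈ g, z ∉ V := by
          intro z hzg hzV
          by_cases hzF : z ∈ F
          · by_cases habs2 : ∃ w, w ∈ g ∧ w ∈ V ∧ w ∉ F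
            · exact huN ((hVN u).mp (habs g hgG habs2 u hug))
            · push_neg at habs2
              have hgR : g ∈ R := (hR g).mpr ⟨hgG, List.ne_nil_of_mem hzg, habs2⟩
              have hgt : g ∈ touched := (htouched g).mpr ⟨hgR, z, hzg, hzF⟩
              have : u ∈ nw := (hnw u).mpr ⟨⟨g, hgt, hug⟩, fun huV => huN ((hVN u).mp huV)⟩
              rw [hnwnil] at this
              exact (List.not_mem_nil) this
          · exact huN ((hVN u).mp (habs g hgG ⟨z, hzg, hzV, hzF⟩ u hug))
        have hgR : g ∈ R := (hR g).mpr
          ⟨hgG, List.ne_nil_of_mem hug, fun x hxg hxV => absurd hxV (hgV x hxg)⟩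
        have hgR' : g ∈ R' := by
          rw [hRdef, List.mem_filter]
          refine ⟨hgR, ?_⟩
          rw [List.isEmpty_iff, List.eq_nil_iff_forall_not_mem]
          intro z hz
          obtain ⟨hzg, hzF⟩ := (PySem.Set.mem_inter _ _ z).mp hz
          exact hgV z hzg (hFV z hzF)
        have hR'e : R'.isEmpty = false := by
          rcases hR'' : R' with _ | ⟨a, t⟩
          · rw [hR''] at hgR'; exact absurd hgR' (List.not_mem_nil)
          · rfl
        obtain ⟨fb', rfl⟩ : ∃ fb', fb = fb' + 1 := ⟨fb - 1, by omega⟩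
        simp only [pvLoopB, hFe, Bool.false_eq_true, if_false,
          ← htdef, ← hRdef, ← hWdef, ← hnwdef, hnwnil]
        simp only [List.isEmpty_nil, if_true, hR'e,
          Bool.false_eq_true, if_false]
        rw [← hKdef, if_pos hstall]
      · -- both sides advance one round and we use the induction hypothesis
        have hnwne : nw ≠ [] := by
          intro hnil
          have hKnil : K = [] := by
            rw [List.eq_nil_iff_forall_not_mem]
            intro x hx
            have := (hKnw x).mpr hx
            rw [hnil] at this
            exact (List.not_mem_nil) this
          have : ∀ x ∈ PySem.Set.union N K, x ∈ N := by
            intro x hx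
            rcases (PySem.Set.mem_union _ _ x).mp hx with h | h
            · exact h
            · rw [hKnil] at h; exact absurd h (List.not_mem_nil)
          have h1 := pvSubLen _ N hnovnd this
          have h2 := pvSubLen N _ hNnd hNsubnov
          omega
        have hnwe : nw.isEmpty = false := by
          rcases hnw'' : nw with _ | ⟨a, t⟩
          · exact absurd hnw'' hnwne
          · rfl
        -- a touched group exists, so R shrinks
        obtain ⟨x0, hx0⟩ := List.exists_mem_of_ne_nil nw hnwne
        obtain ⟨⟨g0, hg0t, -⟩, -⟩ := (hnw x0).mp hx0
        obtain ⟨hg0R, y0, hy0g, hy0F⟩ := (htouched g0).mp hg0t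
        have hg0pred : ((PySem.Set.inter g0 F).isEmpty : Bool) = false := by
          rw [pvIsEmptyFalse]
          exact ⟨y0, (PySem.Set.mem_inter _ _ y0).mpr ⟨hy0g, hy0F⟩⟩
        have hRlt : R'.length < R.length := pvFilterLt _ R g0 hg0R hg0pred
        have hmain := ih fb (PySem.Set.union N K) (PySem.Set.union V nw) nw R' (st + 1)
          hnovnd (PySem.Set.nodup_union _ _ hVnd)
          (by
            intro x
            rw [PySem.Set.mem_union, PySem.Set.mem_union]
            constructor
            · rintro (h | h)
              · exact Or.inl ((hVN x).mp h)
              · exact Or.inr ((hKnw x).mp h)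
            · rintro (h | h)
              · exact Or.inl ((hVN x).mpr h)
              · exact Or.inr ((hKnw x).mpr h))
          (fun x hx => (PySem.Set.mem_union _ _ x).mpr (Or.inr hx))
          (by
            intro x hx
            rcases (PySem.Set.mem_union _ _ x).mp hx with h | h
            · exact hNU x h
            · obtain ⟨g, hgG, -, hxg, -⟩ := (pvMemOkuzeni G N x).mp h
              exact hGU g hgG x hxg)
          (by
            intro g
            rw [hRdef, List.mem_filter]
            constructor
            · rintro ⟨hgR, hgE⟩
              obtain ⟨hgG, hgne, hgVF⟩ := (hR g).mp hgR
              have hgFnil : ∀ z ∈ g, z ∉ F := by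
                intro z hzg hzF
                have : z ∈ PySem.Set.inter g F := (PySem.Set.mem_inter _ _ z).mpr ⟨hzg, hzF⟩
                rw [List.isEmpty_iff.mp hgE] at this
                exact (List.not_mem_nil) this
              refine ⟨hgG, hgne, ?_⟩
              intro x hxg hxU
              rcases (PySem.Set.mem_union _ _ x).mp hxU with h | h
              · exact absurd (hgVF x hxg h) (hgFnil x hxg)
              · exact h
            · rintro ⟨hgG, hgne, h3⟩
              have hgVnil : ∀ z ∈ g, z ∉ V := by
                intro z hzg hzV
                have hznw := h3 z hzg ((PySem.Set.mem_union _ _ z).mpr (Or.inl hzV))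
                exact ((hnw z).mp hznw).2 hzV
              refine ⟨(hR g).mpr ⟨hgG, hgne, fun x hxg hxV => absurd hxV (hgVnil x hxg)⟩, ?_⟩
              rw [List.isEmpty_iff, List.eq_nil_iff_forall_not_mem]
              intro z hz
              obtain ⟨hzg, hzF⟩ := (PySem.Set.mem_inter _ _ z).mp hz
              exact hgVnil z hzg (hFV z hzF))
          (by
            intro g hgG hex x hxg
            obtain ⟨x1, hx1g, hx1in, hx1nw⟩ := hex
            have hx1V : x1 ∈ V := by
              rcases (PySem.Set.mem_union _ _ x1).mp hx1in with h | h
              · exact h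
              · exact absurd h hx1nw
            by_cases hx1F : x1 ∈ F
            · by_cases habs2 : ∃ w, w ∈ g ∧ w ∈ V ∧ w ∉ F
              · exact (PySem.Set.mem_union _ _ x).mpr (Or.inl (habs g hgG habs2 x hxg))
              · push_neg at habs2
                have hgR : g ∈ R := (hR g).mpr ⟨hgG, List.ne_nil_of_mem hx1g, habs2⟩
                have hgt : g ∈ touched := (htouched g).mpr ⟨hgR, x1, hx1g, hx1F⟩
                by_cases hxV : x ∈ V
                · exact (PySem.Set.mem_union _ _ x).mpr (Or.inl hxV)
                · exact (PySem.Set.mem_union _ _ x).mpr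
                    (Or.inr ((hnw x).mpr ⟨⟨g, hgt, hxg⟩, hxV⟩))
            · exact (PySem.Set.mem_union _ _ x).mpr
                (Or.inl (habs g hgG ⟨x1, hx1g, hx1V, hx1F⟩ x hxg)))
          hnwne
          (by
            have h1 : N.length < (PySem.Set.union N K).length :=
              lt_of_le_of_ne (pvSubLen N _ hNnd hNsubnov) (fun h => hstall h.symm)
            omega)
          (by omega)
        simp only [pvLoopB, hFe, Bool.false_eq_true, if_false,
          ← htdef, ← hRdef, ← hWdef, ← hnwdef, hnwe]
        rw [← hKdef, if_neg hstall]
        exact hmain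

-- evaluation of A's loop when prvi is in no group (so nothing ever spreads)
theorem pvANoStart (G : List (PySem.Set Int)) (len_sup : Nat) (prvi : Int)
    (hp : ∀ g ∈ G, prvi ∉ g) (hne : (PySem.Set.ofList [prvi]).length ≠ len_sup) :
    pvLoopA G len_sup (len_sup + 2) 0 (PySem.Set.ofList [prvi]) = none := by
  have hKnil : pvOkuzeni G (PySem.Set.ofList [prvi]) = [] := by
    rw [List.eq_nil_iff_forall_not_mem]
    intro x hx
    obtain ⟨g, hgG, ⟨y, hyg, hyN⟩, -, -⟩ := (pvMemOkuzeni G _ x).mp hx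
    rw [PySem.Set.mem_ofList] at hyN
    simp only [List.mem_singleton] at hyN
    exact hp g hgG (hyN ▸ hyg)
  have h2 : len_sup + 2 = (len_sup + 1) + 1 := rfl
  rw [h2]
  simp only [pvLoopA, if_neg hne, hKnil]
  have hu : PySem.Set.union (PySem.Set.ofList [prvi]) ([] : List Int) = PySem.Set.ofList [prvi] := rfl
  rw [hu]
  simp

-- evaluation of B's loop when prvi is in no group
theorem pvBNoStart (R0 : List (PySem.Set Int)) (prvi : Int)
    (hp : ∀ g ∈ R0, prvi ∉ g) :
    pvLoopB (R0.length + 2) R0 (PySem.Set.ofList [prvi]) (PySem.Set.ofList [prvi]) 0 =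
      (if R0.isEmpty then some 0 else none) := by
  have hprv : prvi ∈ PySem.Set.ofList [prvi] := by
    rw [PySem.Set.mem_ofList]; exact List.mem_singleton.mpr rfl
  have hFe : (PySem.Set.ofList [prvi]).isEmpty = false := by
    rcases h : PySem.Set.ofList [prvi] with _ | ⟨a, t⟩
    · rw [h] at hprv; exact absurd hprv (List.not_mem_nil)
    · rfl
  have hinter : ∀ g ∈ R0, PySem.Set.inter g (PySem.Set.ofList [prvi]) = [] := by
    intro g hg
    rw [List.eq_nil_iff_forall_not_mem]
    intro z hz
    obtain ⟨hzg, hzF⟩ := (PySem.Set.mem_inter _ _ z).mp hz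
    rw [PySem.Set.mem_ofList, List.mem_singleton] at hzF
    exact hp g hg (hzF ▸ hzg)
  have htouched : R0.filter (fun g => !(PySem.Set.inter g (PySem.Set.ofList [prvi])).isEmpty) = [] := by
    rw [List.filter_eq_nil_iff]
    intro g hg
    rw [Bool.not_eq_true, hinter g hg]
    rfl
  have hR' : R0.filter (fun g => (PySem.Set.inter g (PySem.Set.ofList [prvi])).isEmpty) = R0 := by
    rw [List.filter_eq_self]
    intro g hg
    rw [hinter g hg]
    rfl
  have h2 : R0.length + 2 = (R0.length + 1) + 1 := rfl
  rw [h2]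
  simp only [pvLoopB, hFe, Bool.false_eq_true, if_false, htouched, hR']
  rfl

-- the two correspondences between list-level and set-level views of the input
theorem pvGU (skupine1 : List (List Int)) :
    ∀ g ∈ skupine1.map PySem.Set.ofList, ∀ x ∈ g,
      x ∈ PySem.Set.ofList (skupine1.flatMap (fun sk => sk)) := by
  intro g hg x hx
  rw [List.mem_map] at hg
  obtain ⟨sk, hsk, rfl⟩ := hg
  rw [PySem.Set.mem_ofList] at hx ⊢
  exact List.mem_flatMap.mpr ⟨sk, hsk, hx⟩

theorem pvUG (skupine1 : List (List Int)) :
    ∀ x ∈ PySem.Set.ofList (skupine1.flatMap (fun sk => sk)),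
      ∃ g ∈ skupine1.map PySem.Set.ofList, x ∈ g := by
  intro x hx
  rw [PySem.Set.mem_ofList, List.mem_flatMap] at hx
  obtain ⟨sk, hsk, hxsk⟩ := hx
  exact ⟨PySem.Set.ofList sk, List.mem_map_of_mem hsk, (PySem.Set.mem_ofList _ _).mpr hxsk⟩

-- ===== VERDICT (by name: the statement is the Claim_ definition above) =====
theorem korakov_do_vseh_spec : Claim_unchanged_korakov_do_vseh := by
  intro skupine1 prvi _ hnD
  unfold korakov_do_vseh korakov_do_vseh_alt
  simp only []
  set G := skupine1.map PySem.Set.ofList with hGdef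
  set U := PySem.Set.ofList (skupine1.flatMap (fun sk => sk)) with hUdef
  set R0 := G.filter (fun g => !g.isEmpty) with hR0def
  by_cases hp : prvi ∈ skupine1.flatMap (fun sk => sk)
  · -- prvi belongs to some group: full bisimulation
    refine pvBisim G U (PySem.Set.nodup_ofList _) (pvGU skupine1) (pvUG skupine1)
      (U.length + 2) (R0.length + 2)
      (PySem.Set.ofList [prvi]) (PySem.Set.ofList [prvi]) (PySem.Set.ofList [prvi]) R0 0
      (PySem.Set.nodup_ofList _) (PySem.Set.nodup_ofList _)
      (fun x => Iff.rfl) (fun x hx => hx)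
      ?_ ?_ ?_ ?_ ?_ ?_
    · intro x hx
      rw [PySem.Set.mem_ofList, List.mem_singleton] at hx
      rw [hUdef, PySem.Set.mem_ofList]
      exact hx ▸ hp
    · intro g
      rw [hR0def, List.mem_filter, pvBangIsEmpty]
      constructor
      · rintro ⟨h1, h2⟩
        exact ⟨h1, h2, fun x _ hx => hx⟩
      · rintro ⟨h1, h2, -⟩
        exact ⟨h1, h2⟩
    · rintro g - ⟨x, -, hxV, hxF⟩
      exact absurd hxV hxF
    · exact List.ne_nil_of_mem ((PySem.Set.mem_ofList _ _).mpr (List.mem_singleton.mpr rfl))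
    · omega
    · omega
  · -- prvi in no group: both sides return none (since at least two persons exist)
    have hP : ∀ sk ∈ skupine1, prvi ∉ sk :=
      fun sk hsk hmem => hp (List.mem_flatMap.mpr ⟨sk, hsk, hmem⟩)
    have hU2 : 2 ≤ U.length := by
      rcases Decidable.em
          (∀ sk ∈ skupine1, ∀ x ∈ sk, ∀ sk' ∈ skupine1, ∀ y ∈ sk', x = y) with hQ | hQ
      · exact absurd ⟨hP, hQ⟩ hnD
      · push_neg at hQ
        obtain ⟨sk, hsk, x, hx, sk', hsk', y, hy, hxy⟩ := hQ
        rw [hUdef]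
        exact pvTwoLe _ x y ((PySem.Set.mem_ofList _ _).mpr (List.mem_flatMap.mpr ⟨sk, hsk, hx⟩))
          ((PySem.Set.mem_ofList _ _).mpr (List.mem_flatMap.mpr ⟨sk', hsk', hy⟩)) hxy
    have hpg : ∀ g ∈ G, prvi ∉ g := by
      intro g hg hmem
      exact hp ((List.mem_flatMap).mp (by
        rw [hGdef, List.mem_map] at hg
        obtain ⟨sk, hsk, rfl⟩ := hg
        rw [PySem.Set.mem_ofList] at hmem
        exact (List.mem_flatMap.mpr ⟨sk, hsk, hmem⟩ : prvi ∈ skupine1.flatMap (fun sk => sk))) |> fun ⟨sk, hsk, hm⟩ => List.mem_flatMap.mpr ⟨sk, hsk, hm⟩)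
    have hone : (PySem.Set.ofList [prvi]).length = 1 := rfl
    rw [pvANoStart G U.length prvi hpg (by omega)]
    rw [pvBNoStart R0 prvi (fun g hg => hpg g (List.mem_of_mem_filter hg))]
    have hR0ne : R0 ≠ [] := by
      have hUne : U ≠ [] := by
        intro h
        rw [h] at hU2
        simp at hU2
      obtain ⟨x, hxU⟩ := List.exists_mem_of_ne_nil U hUne
      obtain ⟨g, hgG, hxg⟩ := pvUG skupine1 x hxU
      have hgR0 : g ∈ R0 := by
        rw [hR0def, List.mem_filter, pvBangIsEmpty]
        exact ⟨hgG, List.ne_nil_of_mem hxg⟩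
      exact List.ne_nil_of_mem hgR0
    have : R0.isEmpty = false := by
      rcases h : R0 with _ | ⟨a, t⟩
      · exact absurd h hR0ne
      · rfl
    rw [this]
    simp

theorem korakov_do_vseh_changed : Claim_changed_korakov_do_vseh := by
  unfold Claim_changed_korakov_do_vseh; decide

theorem korakov_do_vseh_tight : Claim_exact_korakov_do_vseh := by
  intro skupine1 prvi _ hD
  obtain ⟨hP, hQ⟩ := hD
  have hp : prvi ∉ skupine1.flatMap (fun sk => sk) := by
    intro h
    obtain ⟨sk, hsk, hmem⟩ := List.mem_flatMap.mp h
    exact hP sk hsk hmem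
  unfold korakov_do_vseh korakov_do_vseh_alt
  simp only []
  set G := skupine1.map PySem.Set.ofList with hGdef
  set U := PySem.Set.ofList (skupine1.flatMap (fun sk => sk)) with hUdef
  set R0 := G.filter (fun g => !g.isEmpty) with hR0def
  have hpg : ∀ g ∈ G, prvi ∉ g := by
    intro g hg hmem
    rw [hGdef, List.mem_map] at hg
    obtain ⟨sk, hsk, rfl⟩ := hg
    rw [PySem.Set.mem_ofList] at hmem
    exact hp (List.mem_flatMap.mpr ⟨sk, hsk, hmem⟩)
  have hone : (PySem.Set.ofList [prvi]).length = 1 := rfl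
  rw [pvBNoStart R0 prvi (fun g hg => hpg g (List.mem_of_mem_filter hg))]
  have hle : U.length ≤ 1 := by
    rw [hUdef]
    exact pvOfListLenLe _ (fun a ha b hb => by
      obtain ⟨sk, hsk, ha'⟩ := List.mem_flatMap.mp ha
      obtain ⟨sk', hsk', hb'⟩ := List.mem_flatMap.mp hb
      exact hQ sk hsk a ha' sk' hsk' b hb')
  have hcase : U.length = 0 ∨ U.length = 1 := by
    omega
  rcases hcase with hU1 | hU1
  · -- no persons at all: A returns none, B returns some 0
    have hUnil : U = [] := List.length_eq_zero_iff.mp hU1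
    have hR0nil : R0 = [] := by
      rw [List.eq_nil_iff_forall_not_mem]
      intro g hg
      rw [hR0def, List.mem_filter, pvBangIsEmpty] at hg
      obtain ⟨hgG, hgne⟩ := hg
      obtain ⟨x, hxg⟩ := List.exists_mem_of_ne_nil g hgne
      have := pvGU skupine1 g hgG x hxg
      rw [← hUdef, hUnil] at this
      exact (List.not_mem_nil) this
    rw [pvANoStart G U.length prvi hpg (by omega)]
    rw [hR0nil]
    simp
  · -- exactly one person, never infected: A returns some 0, B returns none
    have hA : pvLoopA G U.length (U.length + 2) 0 (PySem.Set.ofList [prvi]) = some 0 := by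
      have h2 : U.length + 2 = (U.length + 1) + 1 := rfl
      rw [h2]
      simp only [pvLoopA]
      rw [if_pos (by omega)]
    rw [hA]
    have hR0ne : R0 ≠ [] := by
      have hUne : U ≠ [] := by
        intro h
        rw [h] at hU1
        simp at hU1
      obtain ⟨x, hxU⟩ := List.exists_mem_of_ne_nil U hUne
      obtain ⟨g, hgG, hxg⟩ := pvUG skupine1 x hxU
      have hgR0 : g ∈ R0 := by
        rw [hR0def, List.mem_filter, pvBangIsEmpty]
        exact ⟨hgG, List.ne_nil_of_mem hxg⟩
      exact List.ne_nil_of_mem hgR0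
    have : R0.isEmpty = false := by
      rcases h : R0 with _ | ⟨a, t⟩
      · exact absurd h hR0ne
      · rfl
    rw [this]
    simp
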